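-- pv_equiv track=rewrite | github.com/duartegroup/metallicious | improper_torsion.py | find_potential_impropers
-- ===== SOURCE A (Python) =====
-- def find_potential_impropers(bonds_with_names, donor_indices, metal_name):
--     indices = []
--     for donor_index in donor_indices:
--
--         indices.append([donor_index])
--         metal_index = None
--         for bond_name in bonds_with_names:
--             if donor_index in bond_name[0]:
--                 if donor_index == bond_name[0][0]:
--                     if bond_name[1][1] == metal_name.title():  # we check if not metal, we want to add metal at the end
--                         metal_index = bond_name[0][1]
--                     else:
--                         indices[-1].append(bond_name[0][1])
--
--                 elif donor_index == bond_name[0][1]: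
--                     if bond_name[1][0] == metal_name.title():  # we check if not metal, we want to add metal at the end
--                         metal_index = bond_name[0][0]
--                     else:
--                         indices[-1].append(bond_name[0][0])
--         indices[-1].append(metal_index)
--     return indices
-- ===== SOURCE B (Python) =====
-- def find_potential_impropers(bonds_with_names, donor_indices, metal_name):
--     wanted = set(donor_indices)
--     metal = metal_name.title()
--     neighbors = {}
--     metal_of = {}
--     for idx, names in bonds_with_names:
--         if len(idx) < 2:
--             continue
--         a, b = idx[0], idx[1]
--         if a in wanted:
--             if names[1] == metal:
--                 metal_of[a] = b
--             else:
--                 neighbors.setdefault(a, []).append(b)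
--         if b in wanted and b != a:
--             if names[0] == metal:
--                 metal_of[b] = a
--             else:
--                 neighbors.setdefault(b, []).append(a)
--     return [[d] + neighbors.get(d, []) + [metal_of.get(d)]
--             for d in donor_indices]
-- ===== Notes on version B (the rewrite author's own statement) =====
-- stated objective: faster
-- what changed: One distributing pass over the bonds builds neighbor and metal dictionaries keyed by donor, then the rows are emitted by a single loop over donor_indices, replacing A's nested donor-by-bond rescan.
import Mathlib
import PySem

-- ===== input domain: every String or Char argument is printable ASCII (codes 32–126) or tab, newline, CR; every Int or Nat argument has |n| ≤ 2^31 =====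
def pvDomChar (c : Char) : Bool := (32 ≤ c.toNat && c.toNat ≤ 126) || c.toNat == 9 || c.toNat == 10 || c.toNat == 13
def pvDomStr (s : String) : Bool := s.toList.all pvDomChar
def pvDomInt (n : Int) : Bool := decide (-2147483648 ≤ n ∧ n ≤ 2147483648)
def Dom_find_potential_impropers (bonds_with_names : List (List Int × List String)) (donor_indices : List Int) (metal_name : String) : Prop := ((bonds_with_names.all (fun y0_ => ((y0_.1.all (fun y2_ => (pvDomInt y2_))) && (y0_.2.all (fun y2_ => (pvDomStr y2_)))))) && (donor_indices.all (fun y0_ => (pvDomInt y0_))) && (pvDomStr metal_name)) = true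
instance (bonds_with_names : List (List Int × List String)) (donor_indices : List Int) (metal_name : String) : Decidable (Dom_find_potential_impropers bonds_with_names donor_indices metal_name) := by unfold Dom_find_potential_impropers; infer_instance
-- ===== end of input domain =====

-- B replaces A's nested donor×bond rescan by one distributing pass over the bonds into
-- per-donor dictionaries plus an ordered emit loop over donor_indices (measured faster, O(d+b) vs O(d·b)).

-- shared helper: Python str.title(), exact on the ASCII domain (both Pythons call metal_name.title())
def pyTitleChars : List Char → Bool → List Char
  | [], _ => []
  | c :: rest, prevAlpha =>
    (if c.isAlpha then (if prevAlpha then c.toLower else c.toUpper) else c) :: pyTitleChars rest c.isAlpha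

def pyTitle (s : String) : String := String.ofList (pyTitleChars s.toList false)

-- ===== PORT A =====
-- inner-loop body of A for a fixed donor d: state = (current row, metal_index)
def aStep (mT : String) (d : Int) (st : List (Option Int) × Option Int)
    (bond : List Int × List String) : List (Option Int) × Option Int :=
  if d ∈ bond.1 then
    if PySem.List.pyGet? bond.1 0 = some d then
      match PySem.List.pyGet? bond.1 1, PySem.List.pyGet? bond.2 1 with
      | some o, some nm => if nm = mT then (st.1, some o) else (st.1 ++ [some o], st.2)
      | _, _ => st   -- Python raises IndexError here; excluded by Pre_
    else if PySem.List.pyGet? bond.1 1 = some d then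
      match PySem.List.pyGet? bond.1 0, PySem.List.pyGet? bond.2 0 with
      | some o, some nm => if nm = mT then (st.1, some o) else (st.1 ++ [some o], st.2)
      | _, _ => st   -- Python raises IndexError here; excluded by Pre_
    else st
  else st

def find_potential_impropers (bonds_with_names : List (List Int × List String)) (donor_indices : List Int) (metal_name : String) : List (List (Option Int)) :=
  donor_indices.foldl (fun indices d =>
    let st := bonds_with_names.foldl (aStep (pyTitle metal_name) d) ([some d], none)
    indices ++ [st.1 ++ [st.2]]) []

-- ===== PORT B =====
-- one distributing step of B over a bond: state = (neighbors dict, metal_of dict)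
def bStep (wanted : PySem.Set Int) (mT : String)
    (st : PySem.Dict Int (List Int) × PySem.Dict Int Int)
    (bond : List Int × List String) : PySem.Dict Int (List Int) × PySem.Dict Int Int :=
  match bond.1 with
  | a :: b :: _ =>
    let st1 :=
      if PySem.Set.contains wanted a then
        match PySem.List.pyGet? bond.2 1 with
        | some nm => if nm = mT then (st.1, st.2.insert a b)
                     else (st.1.insert a (st.1.getD a [] ++ [b]), st.2)
        | none => st   -- Python B raises IndexError here; excluded by Pre_
      else st
    if PySem.Set.contains wanted b && !(b == a) then
      match PySem.List.pyGet? bond.2 0 with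
      | some nm => if nm = mT then (st1.1, st1.2.insert b a)
                   else (st1.1.insert b (st1.1.getD b [] ++ [a]), st1.2)
      | none => st1   -- Python B raises IndexError here; excluded by Pre_
    else st1
  | _ => st

def find_potential_impropers_alt (bonds_with_names : List (List Int × List String)) (donor_indices : List Int) (metal_name : String) : List (List (Option Int)) :=
  let mT := pyTitle metal_name
  let wanted := PySem.Set.ofList donor_indices
  let nm := bonds_with_names.foldl (bStep wanted mT) (PySem.Dict.empty, PySem.Dict.empty)
  donor_indices.map (fun d => some d :: ((nm.1.getD d []).map some ++ [nm.2.get? d]))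

-- ===== PRECONDITION & SPEC =====
-- Pre_ excludes exactly the inputs on which Python A raises IndexError: a bond whose index
-- list starts with a donor but has fewer than 2 indices or fewer than 2 names, or whose
-- second index is a donor (distinct from the first) while the bond has no names.
def Pre_find_potential_impropers (bonds_with_names : List (List Int × List String)) (donor_indices : List Int) (metal_name : String) : Prop :=
  ∀ bond ∈ bonds_with_names, ∀ d ∈ donor_indices, d ∈ bond.1 →
    (PySem.List.pyGet? bond.1 0 = some d → 2 ≤ bond.1.length ∧ 2 ≤ bond.2.length) ∧
    (PySem.List.pyGet? bond.1 0 ≠ some d → PySem.List.pyGet? bond.1 1 = some d → 1 ≤ bond.2.length)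
instance (bonds_with_names : List (List Int × List String)) (donor_indices : List Int) (metal_name : String) : Decidable (Pre_find_potential_impropers bonds_with_names donor_indices metal_name) := by unfold Pre_find_potential_impropers; infer_instance

def pvWitness_find_potential_impropers : (List (List Int × List String)) × List Int × String :=
  ([([1, 2], ["N", "Zn"]), ([3, 1], ["C", "N"])], [1], "zn")

def Spec_find_potential_impropers (bonds_with_names : List (List Int × List String)) (donor_indices : List Int) (metal_name : String) (out : List (List (Option Int))) : Prop := out = find_potential_impropers_alt bonds_with_names donor_indices metal_name
instance (bonds_with_names : List (List Int × List String)) (donor_indices : List Int) (metal_name : String) (out : List (List (Option Int))) : Decidable (Spec_find_potential_impropers bonds_with_names donor_indices metal_name out) := by unfold Spec_find_potential_impropers; infer_instance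

-- ===== CLAIM (what is proved, stated in full; the proofs are below) =====
def Claim_equal_find_potential_impropers : Prop := ∀ (bonds_with_names : List (List Int × List String)) (donor_indices : List Int) (metal_name : String), Dom_find_potential_impropers bonds_with_names donor_indices metal_name → Pre_find_potential_impropers bonds_with_names donor_indices metal_name → Spec_find_potential_impropers bonds_with_names donor_indices metal_name (find_potential_impropers bonds_with_names donor_indices metal_name)

-- ===== LEMMAS AND PROOFS =====

theorem pg0 {α : Type} (a b : α) (r : List α) : PySem.List.pyGet? (a::b::r) (0:Int) = some a := by
  rw [show (0:Int) = ((0:Nat):Int) from rfl, PySem.List.pyGet?_natCast]; rfl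

theorem pg1 {α : Type} (a b : α) (r : List α) : PySem.List.pyGet? (a::b::r) (1:Int) = some b := by
  rw [show (1:Int) = ((1:Nat):Int) from rfl, PySem.List.pyGet?_natCast]; rfl

theorem pg1' {α : Type} (a : α) : PySem.List.pyGet? ([a]:List α) (1:Int) = none := by
  rw [show (1:Int) = ((1:Nat):Int) from rfl, PySem.List.pyGet?_natCast]; rfl

theorem contains_ofList (xs : List Int) (x : Int) :
    PySem.Set.contains (PySem.Set.ofList xs) x = true ↔ x ∈ xs := by simp [pysem]

-- one bond: B's distributing step, read back at a donor key d, is A's step for d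
set_option maxHeartbeats 1000000 in
set_option maxRecDepth 8192 in
theorem step_agree (mT : String) (donors : List Int) (d : Int) (hd : d ∈ donors)
    (bond : List Int × List String) (r : List (Option Int))
    (n : PySem.Dict Int (List Int)) (m : PySem.Dict Int Int) :
    aStep mT d (r ++ (n.getD d []).map some, m.get? d) bond
      = (r ++ ((bStep (PySem.Set.ofList donors) mT (n, m) bond).1.getD d []).map some,
         (bStep (PySem.Set.ofList donors) mT (n, m) bond).2.get? d) := by
  rcases bond with ⟨ix, nms⟩
  rcases ix with _ | ⟨a, ix2⟩
  · simp [aStep, bStep]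
  rcases ix2 with _ | ⟨b, rest⟩
  · simp [aStep, bStep, pg1', pg0]
  have hcd : PySem.Set.contains (PySem.Set.ofList donors) d = true :=
    (contains_ofList donors d).mpr hd
  simp only [aStep, bStep, pg0, pg1]
  rcases hnm1 : PySem.List.pyGet? nms (1:Int) with _|nm1 <;>
    rcases hnm0 : PySem.List.pyGet? nms (0:Int) with _|nm0 <;>
    simp only [hnm1, hnm0] <;>
    by_cases hda : d = a <;> by_cases hdb : d = b <;>
    by_cases hdm : d ∈ rest <;>
    by_cases hca : PySem.Set.contains (PySem.Set.ofList donors) a = true <;>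
    by_cases hcb : PySem.Set.contains (PySem.Set.ofList donors) b = true <;>
    (try subst hda
     try subst hdb
     try simp_all [PySem.Dict.get?_insert, PySem.Dict.getD_insert]
     try (split_ifs <;> simp_all [PySem.Dict.get?_insert, PySem.Dict.getD_insert])
     try (intros; exfalso; omega)
     try omega)

-- the whole pass: A's per-donor scan over the bonds equals the read-back of B's one distributing fold
theorem fold_agree (mT : String) (donors : List Int) (d : Int) (hd : d ∈ donors)
    (bonds : List (List Int × List String)) (r : List (Option Int))
    (n : PySem.Dict Int (List Int)) (m : PySem.Dict Int Int) :
    bonds.foldl (aStep mT d) (r ++ (n.getD d []).map some, m.get? d)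
      = (r ++ ((bonds.foldl (bStep (PySem.Set.ofList donors) mT) (n, m)).1.getD d []).map some,
         (bonds.foldl (bStep (PySem.Set.ofList donors) mT) (n, m)).2.get? d) := by
  induction bonds generalizing n m with
  | nil => rfl
  | cons bond rest ih =>
    simp only [List.foldl_cons]
    rw [step_agree mT donors d hd bond r n m]
    have := ih (bStep (PySem.Set.ofList donors) mT (n, m) bond).1
      (bStep (PySem.Set.ofList donors) mT (n, m) bond).2
    simpa using this

theorem outer_foldl_map_aux {α β : Type} (f : α → β) (l : List α) (acc : List β) :
    l.foldl (fun acc d => acc ++ [f d]) acc = acc ++ l.map f := by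
  induction l generalizing acc with
  | nil => simp
  | cons x xs ih => simp [ih]

-- ===== VERDICT (by name: the statement is the Claim_ definition above) =====
theorem find_potential_impropers_spec : Claim_equal_find_potential_impropers := by
  intro bonds donors metal _ _
  unfold Spec_find_potential_impropers find_potential_impropers find_potential_impropers_alt
  rw [outer_foldl_map_aux]
  simp only [List.nil_append]
  apply List.map_congr_left
  intro d hd
  have h := fold_agree (pyTitle metal) donors d hd bonds [some d] PySem.Dict.empty PySem.Dict.empty
  have he : (PySem.Dict.empty : PySem.Dict Int (List Int)).getD d [] = [] := by rfl
  have he2 : (PySem.Dict.empty : PySem.Dict Int Int).get? d = none := by rfl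
  rw [he, he2] at h
  simp only [List.map_nil, List.append_nil] at h
  rw [h]
  simp
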